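-- pv_equiv track=rewrite | github.com/abelpetik/btt-project | src/engine/GUI.py | data_reorder
-- ===== SOURCE A (Python) =====
-- from operator import itemgetter
--
-- def data_reorder(data_file):
--     left_eye = []
--     right_eye = []
--     for i in range(len(data_file)):
--         if data_file[i]['TestedEye']=='LeftEye':
--             left_eye.append(data_file[i])
--             #left_eye_stim.append(float(data_file[i]['Stimulus Frequency']))
--
--         if data_file[i]['TestedEye'] =='RightEye':
--             right_eye.append(data_file[i])
--             #right_eye_stim.append(float(data_file[i]['Stimulus Frequency']))
--
--     newlist_left = sorted(left_eye, key=itemgetter('Stimulus Frequency'))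
--     newlist_right = sorted(right_eye, key=itemgetter('Stimulus Frequency'))
--
--     new_data= newlist_left + newlist_right
--
--     return new_data
-- ===== SOURCE B (Python) =====
-- def data_reorder(data_file):
--     kept = [r for r in data_file if r['TestedEye'] in ('LeftEye', 'RightEye')]
--     return sorted(kept, key=lambda r: (0 if r['TestedEye'] == 'LeftEye' else 1,
--                                        r['Stimulus Frequency']))
-- ===== Notes on version B (the rewrite author's own statement) =====
-- stated objective: simpler
-- what changed: Replaced the index-loop partition into two lists plus two separate sorts and a concatenation by a single filter and ONE stable sort with a composite (eye-group, raw frequency) key.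
import Mathlib
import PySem

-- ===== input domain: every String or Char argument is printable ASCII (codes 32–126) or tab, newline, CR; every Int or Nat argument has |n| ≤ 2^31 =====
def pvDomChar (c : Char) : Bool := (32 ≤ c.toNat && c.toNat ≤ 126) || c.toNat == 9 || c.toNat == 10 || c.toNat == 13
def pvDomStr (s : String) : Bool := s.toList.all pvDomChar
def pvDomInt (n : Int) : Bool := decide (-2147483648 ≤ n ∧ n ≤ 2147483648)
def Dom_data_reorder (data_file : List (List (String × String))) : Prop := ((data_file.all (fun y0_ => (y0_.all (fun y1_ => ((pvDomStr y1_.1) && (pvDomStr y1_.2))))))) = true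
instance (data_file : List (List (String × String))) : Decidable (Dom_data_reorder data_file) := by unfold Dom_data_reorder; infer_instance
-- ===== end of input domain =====

-- B replaces A's partition-into-two-lists loop, two sorts and concatenation by one filter and a
-- single stable sort on a composite (eye-group, raw frequency) key; same cost, simpler shape.

-- shared record accessors: dict lookup is first match in the association list
def pvLookup (r : List (String × String)) (k : String) : Option String :=
  (r.find? (fun p => p.1 == k)).map (·.2)
def pvEye (r : List (String × String)) : String := (pvLookup r "TestedEye").getD ""
def pvFreq (r : List (String × String)) : String := (pvLookup r "Stimulus Frequency").getD ""

-- ===== PORT A =====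
-- one iteration of A's partition loop (the two sequential ifs, verbatim)
def pvStepA (acc : List (List (String × String)) × List (List (String × String)))
    (r : List (String × String)) :
    List (List (String × String)) × List (List (String × String)) :=
  let acc := if pvEye r == "LeftEye" then (acc.1 ++ [r], acc.2) else acc
  if pvEye r == "RightEye" then (acc.1, acc.2 ++ [r]) else acc

def data_reorder (data_file : List (List (String × String))) : List (List (String × String)) :=
  let lr := data_file.foldl pvStepA
    (([], []) : List (List (String × String)) × List (List (String × String)))
  PySem.List.sorted lr.1 pvFreq ++ PySem.List.sorted lr.2 pvFreq

-- ===== PORT B =====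
def data_reorder_alt (data_file : List (List (String × String))) : List (List (String × String)) :=
  let kept := data_file.filter (fun r => pvEye r == "LeftEye" || pvEye r == "RightEye")
  PySem.List.sorted2 kept (fun r => if pvEye r == "LeftEye" then (0 : Int) else 1) pvFreq

-- ===== PRECONDITION & SPEC =====
-- Pre_ excludes exactly the inputs on which the Python raises KeyError: a record without a
-- 'TestedEye' key, or a Left/Right record without a 'Stimulus Frequency' key.
def Pre_data_reorder (data_file : List (List (String × String))) : Prop :=
  (data_file.all (fun r =>
    (r.find? (fun p => p.1 == "TestedEye")).isSome &&
    (let eye := ((r.find? (fun p => p.1 == "TestedEye")).map (·.2)).getD ""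
     !(eye == "LeftEye" || eye == "RightEye") ||
       (r.find? (fun p => p.1 == "Stimulus Frequency")).isSome))) = true
instance (data_file : List (List (String × String))) : Decidable (Pre_data_reorder data_file) := by
  unfold Pre_data_reorder; infer_instance
def pvWitness_data_reorder : (List (List (String × String))) :=
  [[("TestedEye", "LeftEye"), ("Stimulus Frequency", "3")],
   [("TestedEye", "RightEye"), ("Stimulus Frequency", "1")],
   [("TestedEye", "Both")]]
def Spec_data_reorder (data_file : List (List (String × String))) (out : List (List (String × String))) : Prop := out = data_reorder_alt data_file
instance (data_file : List (List (String × String))) (out : List (List (String × String))) : Decidable (Spec_data_reorder data_file out) := by unfold Spec_data_reorder; infer_instance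

-- ===== CLAIM (what is proved, stated in full; the proofs are below) =====
def Claim_equal_data_reorder : Prop := ∀ (data_file : List (List (String × String))), Dom_data_reorder data_file → Pre_data_reorder data_file → Spec_data_reorder data_file (data_reorder data_file)

-- ===== LEMMAS AND PROOFS =====

lemma pv_insertBy_congr {α : Type} (b b' : α → α → Bool) (x : α) (L : List α)
    (h : ∀ y ∈ L, b x y = b' x y) :
    PySem.List.insertBy b x L = PySem.List.insertBy b' x L := by
  induction L with
  | nil => rfl
  | cons a t ih =>
    simp only [PySem.List.insertBy, h a (List.mem_cons_self ..)]
    by_cases hb : b' x a = true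
    · simp [hb]
    · simp only [Bool.not_eq_true] at hb
      simp [hb, ih (fun y hy => h y (List.mem_cons_of_mem _ hy))]

lemma pv_insertBy_pass {α : Type} (b : α → α → Bool) (x : α) (L R : List α)
    (h : ∀ y ∈ L, b x y = false) :
    PySem.List.insertBy b x (L ++ R) = L ++ PySem.List.insertBy b x R := by
  induction L with
  | nil => rfl
  | cons a t ih =>
    simp only [List.cons_append, PySem.List.insertBy, h a (List.mem_cons_self ..)]
    simp [ih (fun y hy => h y (List.mem_cons_of_mem _ hy))]

lemma pv_insertBy_front {α : Type} (b : α → α → Bool) (x : α) (L R : List α)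
    (h : ∀ y ∈ R, b x y = true) :
    PySem.List.insertBy b x (L ++ R) = PySem.List.insertBy b x L ++ R := by
  induction L with
  | nil =>
    cases R with
    | nil => rfl
    | cons y ys => simp [PySem.List.insertBy, h y (List.mem_cons_self ..)]
  | cons a t ih =>
    by_cases hb : b x a = true
    · simp [PySem.List.insertBy, hb]
    · simp only [Bool.not_eq_true] at hb
      simp [PySem.List.insertBy, hb, ih]

-- one stable sort on the lexicographic (g, k) key, where g only takes values 0 and 1,
-- is the stable k-sort of the g=0 part followed by the stable k-sort of the g=1 part
lemma pv_split_sorted2 {α : Type} (g : α → Int) (k : α → String)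
    (hg : ∀ r, g r = 0 ∨ g r = 1) (xs : List α) :
    PySem.List.sorted2 xs g k false =
      PySem.List.sorted (xs.filter (fun r => g r == 0)) k false ++
      PySem.List.sorted (xs.filter (fun r => g r == 1)) k false := by
  induction xs using List.reverseRecOn with
  | nil => rfl
  | append_singleton xs x ih =>
    simp only [PySem.List.sorted2, PySem.List.sorted, if_neg (by simp : ¬ (false = true)),
      List.foldl_append, List.foldl_cons, List.foldl_nil, List.filter_append] at *
    rw [ih]
    rcases hg x with hx | hx
    · have h1 : ∀ y ∈ (xs.filter (fun r => g r == 1)).foldl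
          (fun acc x => PySem.List.insertBy (fun a b => decide (k a < k b)) x acc) [],
          (fun a b => decide (g a < g b) || (!decide (g b < g a) && decide (k a < k b))) x y = true := by
        intro y hy
        have : y ∈ xs.filter (fun r => g r == 1) := by
          have := PySem.List.mem_sorted (xs := xs.filter (fun r => g r == 1)) (key := k)
            (rev := false) (x := y)
          simpa [PySem.List.sorted, if_neg (by simp : ¬ (false = true))] using this.mp hy
        have hy1 : g y = 1 := by simpa using (List.mem_filter.mp this).2
        simp [hx, hy1]
      rw [pv_insertBy_front _ _ _ _ h1]
      have h0 : ∀ y ∈ (xs.filter (fun r => g r == 0)).foldl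
          (fun acc x => PySem.List.insertBy (fun a b => decide (k a < k b)) x acc) [],
          (fun a b => decide (g a < g b) || (!decide (g b < g a) && decide (k a < k b))) x y
            = (fun a b => decide (k a < k b)) x y := by
        intro y hy
        have : y ∈ xs.filter (fun r => g r == 0) := by
          have := PySem.List.mem_sorted (xs := xs.filter (fun r => g r == 0)) (key := k)
            (rev := false) (x := y)
          simpa [PySem.List.sorted, if_neg (by simp : ¬ (false = true))] using this.mp hy
        have hy0 : g y = 0 := by simpa using (List.mem_filter.mp this).2
        simp [hx, hy0]
      rw [pv_insertBy_congr _ (fun a b => decide (k a < k b)) _ _ h0]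
      simp [hx]
    · have h0 : ∀ y ∈ (xs.filter (fun r => g r == 0)).foldl
          (fun acc x => PySem.List.insertBy (fun a b => decide (k a < k b)) x acc) [],
          (fun a b => decide (g a < g b) || (!decide (g b < g a) && decide (k a < k b))) x y = false := by
        intro y hy
        have : y ∈ xs.filter (fun r => g r == 0) := by
          have := PySem.List.mem_sorted (xs := xs.filter (fun r => g r == 0)) (key := k)
            (rev := false) (x := y)
          simpa [PySem.List.sorted, if_neg (by simp : ¬ (false = true))] using this.mp hy
        have hy0 : g y = 0 := by simpa using (List.mem_filter.mp this).2
        simp [hx, hy0]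
      rw [pv_insertBy_pass _ _ _ _ h0]
      have h1 : ∀ y ∈ (xs.filter (fun r => g r == 1)).foldl
          (fun acc x => PySem.List.insertBy (fun a b => decide (k a < k b)) x acc) [],
          (fun a b => decide (g a < g b) || (!decide (g b < g a) && decide (k a < k b))) x y
            = (fun a b => decide (k a < k b)) x y := by
        intro y hy
        have : y ∈ xs.filter (fun r => g r == 1) := by
          have := PySem.List.mem_sorted (xs := xs.filter (fun r => g r == 1)) (key := k)
            (rev := false) (x := y)
          simpa [PySem.List.sorted, if_neg (by simp : ¬ (false = true))] using this.mp hy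
        have hy1 : g y = 1 := by simpa using (List.mem_filter.mp this).2
        simp [hx, hy1]
      rw [pv_insertBy_congr _ (fun a b => decide (k a < k b)) _ _ h1]
      simp [hx]

-- an eye value equal to "LeftEye" is not equal to "RightEye"
lemma pv_not_both (r : List (String × String)) (h : (pvEye r == "LeftEye") = true) :
    (pvEye r == "RightEye") = false := by
  rw [beq_iff_eq] at h; rw [h]; decide

-- A's partition loop builds the two filters
lemma pv_foldA (df : List (List (String × String)))
    (acc : List (List (String × String)) × List (List (String × String))) :
    df.foldl pvStepA acc
    = (acc.1 ++ df.filter (fun r => pvEye r == "LeftEye"),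
       acc.2 ++ df.filter (fun r => pvEye r == "RightEye")) := by
  induction df generalizing acc with
  | nil => simp
  | cons r t ih =>
    simp only [List.foldl_cons, List.filter_cons]
    by_cases hL : (pvEye r == "LeftEye") = true
    · have hR := pv_not_both r hL
      rw [show pvStepA acc r = (acc.1 ++ [r], acc.2) from by simp [pvStepA, hL, hR]]
      rw [ih]
      simp [hL, hR, List.append_assoc]
    · simp only [Bool.not_eq_true] at hL
      by_cases hR : (pvEye r == "RightEye") = true
      · rw [show pvStepA acc r = (acc.1, acc.2 ++ [r]) from by simp [pvStepA, hL, hR]]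
        rw [ih]
        simp [hL, hR, List.append_assoc]
      · simp only [Bool.not_eq_true] at hR
        rw [show pvStepA acc r = acc from by simp [pvStepA, hL, hR]]
        rw [ih]
        simp [hL, hR]

-- ===== VERDICT (by name: the statement is the Claim_ definition above) =====
theorem data_reorder_spec : Claim_equal_data_reorder := by
  intro df _ _
  unfold Spec_data_reorder data_reorder data_reorder_alt
  rw [pv_foldA df ([], [])]
  rw [pv_split_sorted2 (fun r => if pvEye r == "LeftEye" then (0 : Int) else 1) pvFreq
    (fun r => by by_cases h : (pvEye r == "LeftEye") = true <;> simp [h])]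
  simp only [List.filter_filter, List.nil_append]
  congr 1
  · congr 1
    apply List.filter_congr
    intro r _
    by_cases hL : (pvEye r == "LeftEye") = true
    · simp [hL]
    · simp only [Bool.not_eq_true] at hL
      simp [hL]
  · congr 1
    apply List.filter_congr
    intro r _
    by_cases hL : (pvEye r == "LeftEye") = true
    · have hR := pv_not_both r hL
      simp [hL, hR]
    · simp only [Bool.not_eq_true] at hL
      simp [hL]
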